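-- pv_equiv track=rewrite | github.com/Arramx/advent-of-code-2019 | four/four.py | adjacent_digits
-- ===== SOURCE A (Python) =====
-- def adjacent_digits(num):
--   for i in range(0, 10):
--     try:
--       result = str(num).index(str(i)+str(i))
--       if result+1:
--         return True
--     except ValueError:
--       pass
--   return False
-- ===== SOURCE B (Python) =====
-- def adjacent_digits(num):
--   s = str(num)
--   return any(a == b for a, b in zip(s, s[1:]))
-- ===== Notes on version B (the rewrite author's own statement) =====
-- stated objective: idiomatic
-- what changed: Replaces A's ten separate substring searches for '00'..'99' (one str.index scan per doubled-digit candidate, guarded by try/except) with a single linear pass comparing each adjacent pair of characters of str(num).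
import Mathlib
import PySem

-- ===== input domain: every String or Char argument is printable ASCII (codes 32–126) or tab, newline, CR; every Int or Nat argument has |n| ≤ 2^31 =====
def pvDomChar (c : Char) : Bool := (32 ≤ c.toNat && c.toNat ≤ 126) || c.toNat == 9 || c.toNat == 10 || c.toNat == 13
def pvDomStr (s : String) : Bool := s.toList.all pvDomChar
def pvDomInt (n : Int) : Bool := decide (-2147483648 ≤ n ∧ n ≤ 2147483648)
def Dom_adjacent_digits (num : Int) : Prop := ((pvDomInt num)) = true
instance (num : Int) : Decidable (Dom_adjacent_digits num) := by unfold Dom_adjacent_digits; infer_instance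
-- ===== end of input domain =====

-- B replaces A's ten separate substring searches (one per doubled-digit "00".."99")
-- by one linear pass comparing adjacent characters of str(num); objective: idiomatic.

-- ===== PORT A =====
-- A's loop over range(0, 10): str(num).index(str(i)+str(i)) is Chars.find
-- (find = -1 exactly where .index raises ValueError, the caught/`pass` branch);
-- `if result+1:` is the Python truthiness test result + 1 ≠ 0.
def pvALoop (s : List Char) : List Int → Bool
  | [] => false
  | i :: rest =>
    let result := PySem.Chars.find s (PySem.Int.toChars i ++ PySem.Int.toChars i)
    if result = -1 then pvALoop s rest          -- except ValueError: pass
    else if result + 1 ≠ 0 then true            -- if result+1: return True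
    else pvALoop s rest

def adjacent_digits (num : Int) : Bool :=
  pvALoop (PySem.Int.toChars num) (PySem.List.pyRange 0 10 1)

-- ===== PORT B =====
-- s = str(num); any(a == b for a, b in zip(s, s[1:]))  — s[1:] is drop 1 (exact for index 1 ≥ 0)
def adjacent_digits_alt (num : Int) : Bool :=
  let s := PySem.Int.toChars num
  (s.zip (s.drop 1)).any (fun p => p.1 == p.2)

-- ===== PRECONDITION & SPEC =====
def Spec_adjacent_digits (num : Int) (out : Bool) : Prop := out = adjacent_digits_alt num
instance (num : Int) (out : Bool) : Decidable (Spec_adjacent_digits num out) := by unfold Spec_adjacent_digits; infer_instance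

-- ===== CLAIM (what is proved, stated in full; the proofs are below) =====
def Claim_equal_adjacent_digits : Prop := ∀ (num : Int), Dom_adjacent_digits num → Spec_adjacent_digits num (adjacent_digits num)

-- ===== LEMMAS AND PROOFS =====

-- B's pass is true iff some doubled character occurs in s.
theorem pvZip_iff (s : List Char) :
    ((s.zip (s.drop 1)).any (fun p => p.1 == p.2)) = true ↔ ∃ c, [c, c] <:+: s := by
  induction s with
  | nil => simp
  | cons a t ih =>
    cases t with
    | nil =>
      constructor
      · intro h; simp at h
      · rintro ⟨c, h⟩
        have := h.length_le
        simp at this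
    | cons b t' =>
      have hz : (((a :: b :: t').zip ((a :: b :: t').drop 1)).any (fun p => p.1 == p.2))
          = ((a == b) || (((b :: t').zip ((b :: t').drop 1)).any (fun p => p.1 == p.2))) := by
        simp
      rw [hz, Bool.or_eq_true, beq_iff_eq, ih]
      constructor
      · rintro (rfl | ⟨c, u, v, h⟩)
        · exact ⟨_, [], t', rfl⟩
        · exact ⟨c, a :: u, v, by simp [h]⟩
      · rintro ⟨c, u, v, h⟩
        rcases u with _ | ⟨x, u⟩
        · injection h with h1 h2
          injection h2 with h3 _
          exact Or.inl (h1.symm.trans h3)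
        · injection h with _ h2
          exact Or.inr ⟨c, u, v, h2⟩

-- One step of A's loop: with -1 ≤ find, the `result+1` test is exactly `find ≠ -1`.
theorem pvALoop_cons (s : List Char) (i : Int) (rest : List Int) :
    pvALoop s (i :: rest) =
      ((PySem.Chars.find s (PySem.Int.toChars i ++ PySem.Int.toChars i) ≠ -1 : Bool)
        || pvALoop s rest) := by
  have h := PySem.Chars.neg_one_le_find s (PySem.Int.toChars i ++ PySem.Int.toChars i)
  simp only [pvALoop]
  by_cases hf : PySem.Chars.find s (PySem.Int.toChars i ++ PySem.Int.toChars i) = -1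
  · simp [hf]
  · have : PySem.Chars.find s (PySem.Int.toChars i ++ PySem.Int.toChars i) + 1 ≠ 0 := by omega
    simp [hf, this]

def pvDigits : List Char := ['0','1','2','3','4','5','6','7','8','9']

theorem pvDigitChar_mem (m : Nat) (hm : m < 10) : Nat.digitChar m ∈ pvDigits := by
  interval_cases m <;> decide

theorem pvToDigitsCore_mem (f : Nat) :
    ∀ (n : Nat) (ds : List Char) (c : Char),
      c ∈ Nat.toDigitsCore 10 f n ds → c ∈ ds ∨ c ∈ pvDigits := by
  induction f with
  | zero => intro n ds c h; exact Or.inl h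
  | succ f ih =>
    intro n ds c h
    simp only [Nat.toDigitsCore] at h
    split at h
    · rcases List.mem_cons.mp h with h | h
      · exact Or.inr (h ▸ pvDigitChar_mem _ (Nat.mod_lt _ (by norm_num)))
      · exact Or.inl h
    · rcases ih _ _ c h with h | h
      · rcases List.mem_cons.mp h with h | h
        · exact Or.inr (h ▸ pvDigitChar_mem _ (Nat.mod_lt _ (by norm_num)))
        · exact Or.inl h
      · exact Or.inr h

theorem pvToDigits_mem {c : Char} {n : Nat} (h : c ∈ Nat.toDigits 10 n) : c ∈ pvDigits := by
  rcases pvToDigitsCore_mem (n + 1) n [] c h with h | h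
  · cases h
  · exact h

-- a doubled char inside x :: ds has its (second) copy inside ds
theorem pvPair_mem_tail {c x : Char} {ds : List Char} (h : [c, c] <:+: x :: ds) : c ∈ ds := by
  rcases h with ⟨u, v, h⟩
  rcases u with _ | ⟨y, u⟩
  · injection h with h1 h2
    exact h2 ▸ List.mem_cons_self
  · injection h with h1 h2
    rw [← h2]; simp

-- any doubled char of str(num) is a decimal digit
theorem pvPair_digit {c : Char} {num : Int} (h : [c, c] <:+: PySem.Int.toChars num) :
    c ∈ pvDigits := by
  unfold PySem.Int.toChars at h
  split at h
  · exact pvToDigits_mem (pvPair_mem_tail h)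
  · rcases h with ⟨u, v, h⟩
    have hc : c ∈ Nat.toDigits 10 num.toNat := by rw [← h]; simp
    exact pvToDigits_mem hc

theorem pvMain (num : Int) : adjacent_digits num = adjacent_digits_alt num := by
  rw [Bool.eq_iff_iff]
  unfold adjacent_digits adjacent_digits_alt
  rw [pvZip_iff]
  have hr : PySem.List.pyRange 0 10 1 = [0,1,2,3,4,5,6,7,8,9] := by decide
  rw [hr]
  have hnil : ∀ s, pvALoop s [] = false := fun _ => rfl
  simp only [pvALoop_cons, hnil, Bool.or_false, Bool.or_eq_true, decide_eq_true_eq, ne_eq,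
    PySem.Chars.find_ne_neg_one_iff]
  constructor
  · intro h
    rcases h with h|h|h|h|h|h|h|h|h|h
    all_goals exact ⟨_, by simpa using h⟩
  · rintro ⟨c, h⟩
    have hc := pvPair_digit h
    unfold pvDigits at hc
    fin_cases hc
    · left; simpa using h
    · right; left; simpa using h
    · right; right; left; simpa using h
    · right; right; right; left; simpa using h
    · right; right; right; right; left; simpa using h
    · right; right; right; right; right; left; simpa using h
    · right; right; right; right; right; right; left; simpa using h
    · right; right; right; right; right; right; right; left; simpa using h
    · right; right; right; right; right; right; right; right; left; simpa using h
    · right; right; right; right; right; right; right; right; right; simpa using h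

-- ===== VERDICT (by name: the statement is the Claim_ definition above) =====
theorem adjacent_digits_spec : Claim_equal_adjacent_digits := by
  intro num _
  unfold Spec_adjacent_digits
  exact pvMain num
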